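-- pv_equiv track=rewrite | github.com/SoftSec-KAIST/Fuzzle | maze-gen/smt2_parser.py | get_negated
-- ===== SOURCE A (Python) =====
-- def extract_vars(cond, variables):
--     vars = set()
--     for var in variables:
--         if var + " " in cond or var + ")" in cond:
--             vars.add(var)
--     return vars
--
-- def get_negated(conds, group, vars, numb):
--     negated_groups = list()
--     new_vars = list()
--     n = 0
--     for cond in group:
--         if conds[cond] == True:
--             n = n + 1
--     if n >= numb:
--         negated = set()
--         for i in range(numb):
--             negated_group = set()
--             for cond in group:
--                 if conds[cond] == True and len(negated) <= i and cond not in negated: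
--                         negated_group.add("(!" + cond + ")")
--                         negated.add(cond)
--                 else:
--                     negated_group.add(cond)
--             negated_groups.append(negated_group)
--     else:
--         for i in range(numb):
--             new_group = set()
--             new_var = "c" + str(i)
--             # negate one of the original and add same conds for new var
--             for cond in group:
--                 if conds[cond] == True:
--                     cond_neg = "(!" + cond + ")"
--                     break
--             new_group.add(cond_neg)
--             for cond in group:
--                 cond_vars = extract_vars(cond, vars)
--                 for v in cond_vars:
--                     cond_new = cond.replace(v, new_var)
--                 new_group.add(cond_new)
--             negated_groups.append(new_group)
--             new_vars.append(new_var)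
--     return negated_groups, new_vars
-- ===== SOURCE B (Python) =====
-- def get_negated(conds, group, variables, numb):
--     truth = [c for c in group if conds[c] == True]
--     distinct = list(dict.fromkeys(truth))
--     if len(truth) >= numb:
--         groups = []
--         for i in range(numb):
--             if i < len(distinct):
--                 t = distinct[i]
--                 idx = group.index(t)
--                 groups.append(set(group[:idx] + ["(!" + t + ")"] + group[idx+1:]))
--             else:
--                 groups.append(set(group))
--         return groups, []
--     # fewer True conditions than requested groups: rename the variables once per group
--     neg = "(!" + truth[0] + ")"
--     matched = []
--     for cond in group:
--         vs = [v for v in dict.fromkeys(variables) if v + " " in cond or v + ")" in cond]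
--         if vs:
--             matched.append((cond, vs[0]))
--     groups, new_vars = [], []
--     for i in range(numb):
--         new_var = "c" + str(i)
--         g = {neg}
--         for cond, v in matched:
--             g.add(cond.replace(v, new_var))
--         groups.append(g)
--         new_vars.append(new_var)
--     return groups, new_vars
-- ===== Notes on version B (the rewrite author's own statement) =====
-- stated objective: alternative
-- what changed: B precomputes the list of True conditions once and builds each negated group directly by slicing at the first occurrence of the i-th distinct True condition, replacing A's coupled growing `negated` accumulator with its length/membership guard; in the renaming branch B extracts each condition's matched variable once up front instead of re-extracting it for every new variable, and skips conditions with no variable instead of re-adding a stale cond_new.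
import Mathlib
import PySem

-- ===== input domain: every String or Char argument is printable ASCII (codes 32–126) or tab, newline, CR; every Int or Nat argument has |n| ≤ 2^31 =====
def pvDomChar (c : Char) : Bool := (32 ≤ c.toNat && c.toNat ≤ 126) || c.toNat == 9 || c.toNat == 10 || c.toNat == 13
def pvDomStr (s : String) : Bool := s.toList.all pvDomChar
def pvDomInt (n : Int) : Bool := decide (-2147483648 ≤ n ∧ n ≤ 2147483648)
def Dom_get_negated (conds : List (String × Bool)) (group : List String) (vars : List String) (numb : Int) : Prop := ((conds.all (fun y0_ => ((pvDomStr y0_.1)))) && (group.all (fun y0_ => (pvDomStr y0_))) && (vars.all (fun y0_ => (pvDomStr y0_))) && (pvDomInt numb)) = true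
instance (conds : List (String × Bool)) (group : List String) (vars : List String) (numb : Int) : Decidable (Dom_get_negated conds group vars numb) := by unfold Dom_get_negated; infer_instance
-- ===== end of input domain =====

-- B restructures A: it precomputes the list of True conditions once and builds each negated
-- group directly (slice at the index of the i-th distinct True condition) instead of A's
-- growing `negated` accumulator, and in the renaming branch it precomputes each condition's
-- matched variable once instead of re-extracting it for every new variable (objective:
-- alternative/faster-constant). Return-value equivalence only; neither mutates its arguments.

-- ===== PORT A =====
-- conds[c] == True  (the KeyError of a missing key is excluded by Pre_)
def pvIsT (conds : List (String × Bool)) (c : String) : Bool :=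
  PySem.Dict.getD (PySem.Dict.mk conds) c false

-- `var + " " in cond or var + ")" in cond`
def pvMatch (v c : String) : Bool :=
  PySem.Str.isIn (v ++ " ") c || PySem.Str.isIn (v ++ ")") c

def extract_vars (cond : String) (varbs : List String) : List String :=
  varbs.foldl (fun s v => if pvMatch v cond then PySem.Set.add s v else s) []

-- one step of the `for cond in group` loop of the `n >= numb` branch (state: negated_group, negated)
def pvStepIf (conds : List (String × Bool)) (i : Int) (p : List String × List String)
    (cond : String) : List String × List String :=
  if pvIsT conds cond && decide ((p.2.length : Int) ≤ i) && !(PySem.Set.contains p.2 cond) then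
    (PySem.Set.add p.1 ("(!" ++ cond ++ ")"), PySem.Set.add p.2 cond)
  else
    (PySem.Set.add p.1 cond, p.2)

-- one step of the `for cond in group` loop of the else branch (state: new_group, cond_new).
-- Python iterates the set cond_vars in hash order and keeps the last replacement; this fold
-- keeps the last insertion-order element — identical where Pre_ holds (≤ 1 extracted var).
-- cn = none is Python's unbound cond_new (NameError) — excluded by Pre_.
def pvStepElse (vars : List String) (new_var : String) (p : List String × Option String)
    (cond : String) : List String × Option String :=
  let cond_vars := extract_vars cond vars
  let cn : Option String := cond_vars.foldl (fun _ v => some (PySem.Str.replace cond v new_var)) p.2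
  (PySem.Set.add p.1 (cn.getD ""), cn)

def get_negated (conds : List (String × Bool)) (group : List String) (vars : List String)
    (numb : Int) : List (List String) × List String :=
  let n : Int := group.foldl (fun n cond => if pvIsT conds cond then n + 1 else n) 0
  if numb ≤ n then
    let st := (PySem.List.pyRange 0 numb 1).foldl
      (fun (st : List (List String) × List String) i =>
        let p := group.foldl (pvStepIf conds i) ([], st.2)
        (st.1 ++ [p.1], p.2)) ([], [])
    (st.1, [])
  else
    let st := (PySem.List.pyRange 0 numb 1).foldl
      (fun (st : (List (List String) × List String) × Option String) i =>
        let new_var := "c" ++ PySem.Int.toStr i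
        -- `for cond in group: if conds[cond] == True: cond_neg = "(!"+cond+")"; break`;
        -- the getD "" branch is Python's NameError (no True cond) — excluded by Pre_
        let cond_neg : String :=
          ((group.find? (fun c => pvIsT conds c)).map (fun c => "(!" ++ c ++ ")")).getD ""
        let p := group.foldl (pvStepElse vars new_var) (PySem.Set.add [] cond_neg, st.2)
        ((st.1.1 ++ [p.1], st.1.2 ++ [new_var]), p.2))
      (([], []), none)
    st.1

-- ===== PORT B =====
-- Source B's `vs = [v for v in dict.fromkeys(vars) if ...]; (cond, vs[0]) if vs`
def pvMatched (vars : List String) (cond : String) : Option (String × String) :=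
  match (PySem.List.dedup vars).filter (fun v => pvMatch v cond) with
  | [] => none
  | v :: _ => some (cond, v)

def get_negated_alt (conds : List (String × Bool)) (group : List String) (vars : List String)
    (numb : Int) : List (List String) × List String :=
  let truth := group.filter (fun c => pvIsT conds c)
  let distinct := PySem.List.dedup truth
  if numb ≤ (truth.length : Int) then
    (((PySem.List.pyRange 0 numb 1).map (fun i =>
        match distinct[i.toNat]? with
        | some t =>
          -- group.index(t) always succeeds: t comes from group
          let idx : Int := ((PySem.List.index? group t).getD 0 : Nat)
          PySem.Set.ofList (PySem.List.slice group none (some idx)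
            ++ ("(!" ++ t ++ ")") :: PySem.List.slice group (some (idx + 1)) none)
        | none => PySem.Set.ofList group)),
     [])
  else
    -- truth[0]: the IndexError on an empty truth is excluded by Pre_
    let neg := "(!" ++ truth.headD "" ++ ")"
    let matched := group.filterMap (pvMatched vars)
    let pairs := (PySem.List.pyRange 0 numb 1).map (fun i =>
        let new_var := "c" ++ PySem.Int.toStr i
        (matched.foldl (fun g cv => PySem.Set.add g (PySem.Str.replace cv.1 cv.2 new_var)) [neg],
         new_var))
    (pairs.map Prod.fst, pairs.map Prod.snd)

-- ===== PRECONDITION & SPEC =====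
-- `∀ v w matching cond, v = w`: cond mentions at most one variable
def pvSingle (vars : List String) (cond : String) : Prop :=
  ∀ v ∈ vars, ∀ w ∈ vars, pvMatch v cond = true → pvMatch w cond = true → v = w

-- Pre_ excludes (a) groups with a condition missing from conds (A raises KeyError), and, when
-- the renaming branch runs (fewer True conditions than numb): (b) groups with no True
-- condition or whose first condition mentions no variable (A raises NameError), and (c) groups
-- with a condition mentioning two or more variables, where A's value depends on Python's
-- hash-based set iteration order and is not a function of the input.
def Pre_get_negated (conds : List (String × Bool)) (group : List String) (vars : List String)
    (numb : Int) : Prop :=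
  (∀ c ∈ group, ((PySem.Dict.mk conds).get? c).isSome) ∧
  (((group.countP (fun c => pvIsT conds c) : Int) < numb) →
    (1 ≤ group.countP (fun c => pvIsT conds c) ∧
     (∃ c0, group.head? = some c0 ∧ ∃ v ∈ vars, pvMatch v c0 = true) ∧
     (∀ c ∈ group, pvSingle vars c)))

instance (conds : List (String × Bool)) (group : List String) (vars : List String) (numb : Int) :
    Decidable (Pre_get_negated conds group vars numb) := by
  unfold Pre_get_negated pvSingle; infer_instance

def pvWitness_get_negated : (List (String × Bool)) × List String × List String × Int :=
  ([("a ", true)], ["a "], [], 1)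

def Spec_get_negated (conds : List (String × Bool)) (group : List String) (vars : List String)
    (numb : Int) (out : List (List String) × List String) : Prop :=
  out = get_negated_alt conds group vars numb

instance (conds : List (String × Bool)) (group : List String) (vars : List String) (numb : Int)
    (out : List (List String) × List String) : Decidable (Spec_get_negated conds group vars numb out) := by
  unfold Spec_get_negated; infer_instance

-- ===== CLAIM (what is proved, stated in full; the proofs are below) =====
def Claim_equal_get_negated : Prop := ∀ (conds : List (String × Bool)) (group : List String) (vars : List String) (numb : Int), Dom_get_negated conds group vars numb → Pre_get_negated conds group vars numb → Spec_get_negated conds group vars numb (get_negated conds group vars numb)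

-- ===== LEMMAS AND PROOFS =====

lemma pv_extract_eq (cond : String) (vs : List String) :
    extract_vars cond vs = PySem.Set.ofList (vs.filter (fun v => pvMatch v cond)) := by
  unfold extract_vars
  rw [PySem.Set.ofList_eq_foldl, List.foldl_filter]

lemma pv_filter_ofList {p : String → Bool} (xs : List String) :
    (PySem.Set.ofList xs).filter p = PySem.Set.ofList (xs.filter p) := by
  induction xs with
  | nil => simp [PySem.Set.ofList_nil]
  | cons x xs ih =>
    by_cases hx : p x
    · simp only [PySem.Set.ofList_cons, List.filter_cons, hx, if_pos, PySem.Set.discard]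
      rw [List.filter_comm, ih]
    · simp only [PySem.Set.ofList_cons, List.filter_cons, hx, Bool.false_eq_true, if_false,
        PySem.Set.discard]
      rw [List.filter_comm, ih, List.filter_eq_self.mpr]
      intro a ha
      have hap : p a = true := List.of_mem_filter ((PySem.Set.mem_ofList _ _).mp ha)
      have : a ≠ x := by rintro rfl; rw [hap] at hx; exact hx rfl
      simpa using this

lemma pv_short (l : List String) (hn : l.Nodup) (he : ∀ a ∈ l, ∀ b ∈ l, a = b) :
    l = [] ∨ ∃ v, l = [v] := by
  cases l with
  | nil => exact Or.inl rfl
  | cons a l =>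
    cases l with
    | nil => exact Or.inr ⟨a, rfl⟩
    | cons b l =>
      exfalso
      have hab : a = b := he a (by simp) b (by simp)
      simp [hab] at hn

-- the extracted-variable list of a cond with at most one variable, A-side and B-side
lemma pv_vars_cases (vars : List String) (cond : String) (hs : pvSingle vars cond) :
    (extract_vars cond vars = [] ∧ pvMatched vars cond = none ∧ vars.filter (fun v => pvMatch v cond) = []) ∨
    (∃ v, extract_vars cond vars = [v] ∧ pvMatched vars cond = some (cond, v)) := by
  have hofl := pv_extract_eq cond vars
  have hded : (PySem.List.dedup vars).filter (fun v => pvMatch v cond) =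
      PySem.Set.ofList (vars.filter (fun v => pvMatch v cond)) := by
    rw [PySem.List.dedup_eq_ofList, pv_filter_ofList]
  have hshort := pv_short (PySem.Set.ofList (vars.filter (fun v => pvMatch v cond)))
    (PySem.Set.nodup_ofList _)
    (by
      intro a ha b hb
      rw [PySem.Set.mem_ofList] at ha hb
      exact hs a (List.mem_filter.mp ha).1 b (List.mem_filter.mp hb).1
        (List.mem_filter.mp ha).2 (List.mem_filter.mp hb).2)
  rcases hshort with h0 | ⟨v, hv⟩
  · left
    refine ⟨by rw [hofl, h0], ?_, ?_⟩
    · unfold pvMatched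
      rw [hded, h0]
    · rw [List.eq_nil_iff_forall_not_mem]
      intro a ha
      have : a ∈ PySem.Set.ofList (vars.filter (fun v => pvMatch v cond)) :=
        (PySem.Set.mem_ofList _ _).mpr ha
      rw [h0] at this
      simp at this
  · right
    refine ⟨v, by rw [hofl, hv], ?_⟩
    unfold pvMatched
    rw [hded, hv]

-- saturated scan: the guard fails on every element, the round only re-adds the conds
lemma pv_sat (conds : List (String × Bool)) (i : Int) (grp : List String) :
    ∀ gs neg, (∀ c ∈ grp, pvIsT conds c = true → ¬((neg.length : Int) ≤ i ∧ c ∉ neg)) →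
    grp.foldl (pvStepIf conds i) (gs, neg) = (grp.foldl PySem.Set.add gs, neg) := by
  induction grp with
  | nil => intro gs neg h; rfl
  | cons c cs ih =>
    intro gs neg h
    have hstep : pvStepIf conds i (gs, neg) c = (PySem.Set.add gs c, neg) := by
      unfold pvStepIf
      by_cases hT : pvIsT conds c = true
      · have := h c (by simp) hT
        by_cases hlen : (neg.length : Int) ≤ i
        · have hmem : c ∈ neg := by
            by_contra hc
            exact this ⟨hlen, hc⟩
          simp [hT, hlen, hmem]
        · simp [hT, hlen]
      · simp [hT]
    simp only [List.foldl_cons, hstep]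
    exact ih (PySem.Set.add gs c) neg (fun a ha hT => h a (by simp [ha]) hT)

-- the scan of round k: negates exactly the first occurrence of t = D[k]
lemma pv_pre (conds : List (String × Bool)) (t : String) (k : Nat) (D : List String)
    (hD : D.Nodup) (hk : D[k]? = some t) (ht : pvIsT conds t = true) :
    ∀ xs ys (gs : List String), (∀ c ∈ xs, pvIsT conds c = true → c ∈ D.take k) → t ∉ xs →
    (xs ++ t :: ys).foldl (pvStepIf conds (k : Int)) (gs, D.take k) =
      ((xs ++ ("(!" ++ t ++ ")") :: ys).foldl PySem.Set.add gs, D.take (k + 1)) := by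
  have hklen : k < D.length := by
    rw [List.getElem?_eq_some_iff] at hk; exact hk.1
  have hkt : D[k]'hklen = t := by
    rw [List.getElem?_eq_some_iff] at hk; exact hk.2
  have hnotk : t ∉ D.take k := by
    intro hmem
    rw [List.mem_take_iff_getElem] at hmem
    obtain ⟨j, hj, hjt⟩ := hmem
    have h2 : (⟨j, by omega⟩ : Fin D.length) = ⟨k, hklen⟩ :=
      (List.nodup_iff_injective_getElem.mp hD) (by simp [hjt, hkt])
    simp at h2; omega
  intro xs
  induction xs with
  | nil =>
    intro ys gs _ _
    simp only [List.nil_append, List.foldl_cons]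
    have hstep : pvStepIf conds (k : Int) (gs, D.take k) t =
        (PySem.Set.add gs ("(!" ++ t ++ ")"), D.take (k + 1)) := by
      unfold pvStepIf
      have hlen : (D.take k).length = k := by simp [List.length_take]; omega
      have hcon : PySem.Set.contains (D.take k) t = false := by
        rw [← Bool.not_eq_true]
        intro hc
        exact hnotk ((PySem.Set.contains_iff _ _).mp hc)
      have htake : D.take (k + 1) = D.take k ++ [t] := by
        rw [List.take_add_one, hk]; rfl
      rw [PySem.Set.add_of_not_mem hnotk, ← htake]
      simp [ht, hlen, hnotk]
    rw [hstep]
    exact pv_sat conds (k : Int) ys _ (D.take (k + 1)) (fun c _ _ h => by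
      have : (D.take (k + 1)).length = k + 1 := by simp [List.length_take]; omega
      rw [this] at h
      have := h.1
      omega)
  | cons x xs ih =>
    intro ys gs hxs htx
    simp only [List.cons_append, List.foldl_cons]
    have hstep : pvStepIf conds (k : Int) (gs, D.take k) x = (PySem.Set.add gs x, D.take k) := by
      unfold pvStepIf
      by_cases hT : pvIsT conds x = true
      · have hmem : x ∈ D.take k := hxs x (by simp) hT
        simp [hT, hmem]
      · simp [hT]
    rw [hstep]
    exact ih ys (PySem.Set.add gs x) (fun c hc hT => hxs c (by simp [hc]) hT)
      (fun hc => htx (by simp [hc]))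

-- every True cond left of the first occurrence of t = distinct[k] is among the first k distinct
lemma pv_order (conds : List (String × Bool)) (xs ys : List String) (t : String) (k : Nat)
    (ht : pvIsT conds t = true) (htx : t ∉ xs)
    (hk : (PySem.List.dedup ((xs ++ t :: ys).filter (fun c => pvIsT conds c)))[k]? = some t) :
    (PySem.List.dedup ((xs ++ t :: ys).filter (fun c => pvIsT conds c))).take k =
      PySem.Set.ofList (xs.filter (fun c => pvIsT conds c)) := by
  have hfil : (xs ++ t :: ys).filter (fun c => pvIsT conds c) =
      xs.filter (fun c => pvIsT conds c) ++ t :: ys.filter (fun c => pvIsT conds c) := by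
    simp [List.filter_append, List.filter_cons, ht]
  have htas : t ∉ PySem.Set.ofList (xs.filter (fun c => pvIsT conds c)) := by
    rw [PySem.Set.mem_ofList]; intro h; exact htx (List.mem_of_mem_filter h)
  have hD : PySem.List.dedup ((xs ++ t :: ys).filter (fun c => pvIsT conds c)) =
      PySem.Set.ofList (xs.filter (fun c => pvIsT conds c)) ++ [t] ++
        List.filter (fun y => !(PySem.Set.ofList (xs.filter (fun c => pvIsT conds c)) ++ [t]).contains y)
          (PySem.Set.ofList (ys.filter (fun c => pvIsT conds c))) := by
    rw [PySem.List.dedup_eq_ofList, hfil, PySem.Set.ofList_append, PySem.Set.update_cons,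
      PySem.Set.add_of_not_mem htas, PySem.Set.update_eq_append_filter]
  have hnd : (PySem.List.dedup ((xs ++ t :: ys).filter (fun c => pvIsT conds c))).Nodup := by
    rw [PySem.List.dedup_eq_ofList]; exact PySem.Set.nodup_ofList _
  set L := PySem.Set.ofList (xs.filter (fun c => pvIsT conds c)) with hL
  have h1 : (PySem.List.dedup ((xs ++ t :: ys).filter (fun c => pvIsT conds c)))[L.length]? = some t := by
    rw [hD, List.append_assoc, List.getElem?_append_right (by omega)]
    simp
  have hkn : k = L.length := by
    rw [List.getElem?_eq_some_iff] at hk h1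
    obtain ⟨hk1, hk2⟩ := hk
    obtain ⟨h11, h12⟩ := h1
    have h2 : (⟨k, hk1⟩ : Fin _) = ⟨L.length, h11⟩ :=
      (List.nodup_iff_injective_getElem.mp hnd) (by simp only [Fin.getElem_fin]; rw [hk2, h12])
    simpa using h2
  rw [hD, hkn, List.append_assoc, List.take_left]

-- B's group of round k, as a function of the Nat round index
def pvBg (conds : List (String × Bool)) (group : List String) (k : Nat) : List String :=
  match (PySem.List.dedup (group.filter (fun c => pvIsT conds c)))[k]? with
  | some t =>
    let idx := (PySem.List.index? group t).getD 0
    PySem.Set.ofList (group.take idx ++ ("(!" ++ t ++ ")") :: group.drop (idx + 1))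
  | none => PySem.Set.ofList group

lemma pv_roundIf (conds : List (String × Bool)) (group : List String) (k : Nat) :
    group.foldl (pvStepIf conds (k : Int))
        ([], (PySem.List.dedup (group.filter (fun c => pvIsT conds c))).take k) =
      (pvBg conds group k,
       (PySem.List.dedup (group.filter (fun c => pvIsT conds c))).take (k + 1)) := by
  have hnd : (PySem.List.dedup (group.filter (fun c => pvIsT conds c))).Nodup := by
    rw [PySem.List.dedup_eq_ofList]; exact PySem.Set.nodup_ofList _
  unfold pvBg
  cases hkk : (PySem.List.dedup (group.filter (fun c => pvIsT conds c)))[k]? with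
  | none =>
    have hlen : (PySem.List.dedup (group.filter (fun c => pvIsT conds c))).length ≤ k :=
      List.getElem?_eq_none_iff.mp hkk
    rw [List.take_of_length_le hlen, List.take_of_length_le (by omega)]
    rw [pv_sat conds (k : Int) group [] _ (fun c hc hT h => h.2 (by
      rw [PySem.List.dedup_eq_ofList, PySem.Set.mem_ofList]
      exact List.mem_filter.mpr ⟨hc, hT⟩))]
    rw [← PySem.Set.ofList_eq_foldl]
  | some t =>
    have htmem : t ∈ PySem.List.dedup (group.filter (fun c => pvIsT conds c)) := by
      rw [List.getElem?_eq_some_iff] at hkk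
      obtain ⟨h1, h2⟩ := hkk
      exact h2 ▸ List.getElem_mem h1
    have htg : t ∈ group ∧ pvIsT conds t = true := by
      rw [PySem.List.dedup_eq_ofList, PySem.Set.mem_ofList, List.mem_filter] at htmem
      exact htmem
    obtain ⟨idx, hid⟩ : ∃ i, PySem.List.index? group t = some i :=
      Option.isSome_iff_exists.mp (List.isSome_idxOf?.mpr htg.1)
    have hid' : List.idxOf? t group = some idx := hid
    rw [List.idxOf?_eq_some_iff] at hid'
    obtain ⟨hidlen, hidt, hidfst⟩ := hid'
    have hsplit : group.take idx ++ t :: group.drop (idx + 1) = group := by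
      rw [← hidt, List.getElem_cons_drop, List.take_append_drop]
    have htx : t ∉ group.take idx := by
      intro hmem
      rw [List.mem_take_iff_getElem] at hmem
      obtain ⟨j, hj, hjt⟩ := hmem
      exact hidfst j (by omega) hjt
    have hord : (PySem.List.dedup (group.filter (fun c => pvIsT conds c))).take k =
        PySem.Set.ofList ((group.take idx).filter (fun c => pvIsT conds c)) := by
      conv_lhs => rw [← hsplit]
      exact pv_order conds _ _ t k htg.2 htx (by rw [hsplit]; exact hkk)
    have hxs : ∀ c ∈ group.take idx, pvIsT conds c = true →
        c ∈ (PySem.List.dedup (group.filter (fun c => pvIsT conds c))).take k := by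
      intro c hc hT
      rw [hord, PySem.Set.mem_ofList]
      exact List.mem_filter.mpr ⟨hc, hT⟩
    have hpre := pv_pre conds t k _ hnd hkk htg.2
      (group.take idx) (group.drop (idx + 1)) [] hxs htx
    rw [hsplit] at hpre
    rw [hpre, ← PySem.Set.ofList_eq_foldl]
    simp only [hid, Option.getD_some]

lemma pv_outerIf (conds : List (String × Bool)) (group : List String) (m : Nat) :
    (List.range m).foldl
        (fun (st : List (List String) × List String) (k : Nat) =>
          let p := group.foldl (pvStepIf conds (k : Int)) ([], st.2)
          (st.1 ++ [p.1], p.2)) ([], []) =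
      ((List.range m).map (pvBg conds group),
       (PySem.List.dedup (group.filter (fun c => pvIsT conds c))).take m) := by
  induction m with
  | zero => simp
  | succ m ih =>
    rw [List.range_succ, List.foldl_append, ih, List.map_append]
    simp only [List.foldl_cons, List.foldl_nil, List.map_cons, List.map_nil]
    rw [pv_roundIf conds group m]

-- else branch: the scan over the tail, with the last replacement already in the set
lemma pv_elseInner (vars : List String) (nv : String)
    (rest : List String) :
    ∀ (g : List String) (s : String), s ∈ g → (∀ c ∈ rest, pvSingle vars c) →
    ∃ s', rest.foldl (pvStepElse vars nv) (g, some s) =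
      ((rest.filterMap (pvMatched vars)).foldl
        (fun g cv => PySem.Set.add g (PySem.Str.replace cv.1 cv.2 nv)) g, some s') ∧
      s' ∈ (rest.filterMap (pvMatched vars)).foldl
        (fun g cv => PySem.Set.add g (PySem.Str.replace cv.1 cv.2 nv)) g := by
  induction rest with
  | nil => intro g s hs _; exact ⟨s, rfl, hs⟩
  | cons c cs ih =>
    intro g s hs hsing
    rcases pv_vars_cases vars c (hsing c (by simp)) with ⟨he, hm, _⟩ | ⟨v, he, hm⟩
    · have hstep : pvStepElse vars nv (g, some s) c = (g, some s) := by
        unfold pvStepElse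
        rw [he]
        simp [PySem.Set.add_of_mem hs]
      simp only [List.foldl_cons, hstep, List.filterMap_cons, hm]
      exact ih g s hs (fun a ha => hsing a (by simp [ha]))
    · have hstep : pvStepElse vars nv (g, some s) c =
          (PySem.Set.add g (PySem.Str.replace c v nv), some (PySem.Str.replace c v nv)) := by
        unfold pvStepElse
        rw [he]
        simp
      simp only [List.foldl_cons, hstep, List.filterMap_cons, hm]
      exact ih _ _ ((PySem.Set.mem_add _ _ _).mpr (Or.inr rfl))
        (fun a ha => hsing a (by simp [ha]))

lemma pv_elseRound (conds : List (String × Bool)) (group vars : List String) (nv : String)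
    (cn : Option String)
    (hne : 1 ≤ group.countP (fun c => pvIsT conds c))
    (hhead : ∃ c0, group.head? = some c0 ∧ ∃ v ∈ vars, pvMatch v c0 = true)
    (hsing : ∀ c ∈ group, pvSingle vars c) :
    (group.foldl (pvStepElse vars nv)
        (PySem.Set.add []
          (((group.find? (fun c => pvIsT conds c)).map (fun c => "(!" ++ c ++ ")")).getD ""), cn)).1 =
      (group.filterMap (pvMatched vars)).foldl
        (fun g cv => PySem.Set.add g (PySem.Str.replace cv.1 cv.2 nv))
        ["(!" ++ (group.filter (fun c => pvIsT conds c)).headD "" ++ ")"] := by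
  obtain ⟨c0, hh, v, hv, hmv⟩ := hhead
  obtain ⟨rest, rfl⟩ : ∃ rest, group = c0 :: rest := by
    cases group with
    | nil => simp at hh
    | cons a l =>
      simp only [List.head?_cons, Option.some.injEq] at hh
      exact ⟨l, by rw [hh]⟩
  obtain ⟨t0, ts, hts⟩ : ∃ t0 ts, List.filter (fun c => pvIsT conds c) (c0 :: rest) = t0 :: ts := by
    cases hf : List.filter (fun c => pvIsT conds c) (c0 :: rest) with
    | nil => rw [List.countP_eq_length_filter, hf] at hne; simp at hne
    | cons a l => exact ⟨a, l, rfl⟩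
  have hneg : (((c0 :: rest).find? (fun c => pvIsT conds c)).map
      (fun c => "(!" ++ c ++ ")")).getD "" =
      "(!" ++ (List.filter (fun c => pvIsT conds c) (c0 :: rest)).headD "" ++ ")" := by
    rw [← List.head?_filter, hts]
    rfl
  rcases pv_vars_cases vars c0 (hsing c0 (by simp)) with ⟨_, _, hf0⟩ | ⟨v0, he0, hm0⟩
  · exfalso
    have : v ∈ vars.filter (fun w => pvMatch w c0) := List.mem_filter.mpr ⟨hv, hmv⟩
    rw [hf0] at this
    simp at this
  · rw [hneg]
    set negs : String := "(!" ++ (List.filter (fun c => pvIsT conds c) (c0 :: rest)).headD "" ++ ")"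
      with hnegs
    have hstep : pvStepElse vars nv (PySem.Set.add [] negs, cn) c0 =
        (PySem.Set.add (PySem.Set.add [] negs) (PySem.Str.replace c0 v0 nv),
         some (PySem.Str.replace c0 v0 nv)) := by
      unfold pvStepElse
      rw [he0]
      simp
    simp only [List.foldl_cons, hstep, List.filterMap_cons, hm0]
    obtain ⟨s', hfold, _⟩ := pv_elseInner vars nv rest
      (PySem.Set.add (PySem.Set.add [] negs) (PySem.Str.replace c0 v0 nv))
      (PySem.Str.replace c0 v0 nv) ((PySem.Set.mem_add _ _ _).mpr (Or.inr rfl))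
      (fun a ha => hsing a (by simp [ha]))
    rw [hfold]
    rfl

-- B's group of round k in the renaming branch
def pvEg (conds : List (String × Bool)) (group vars : List String) (k : Nat) : List String :=
  (group.filterMap (pvMatched vars)).foldl
    (fun g cv => PySem.Set.add g (PySem.Str.replace cv.1 cv.2 ("c" ++ PySem.Int.toStr (k : Int))))
    ["(!" ++ (group.filter (fun c => pvIsT conds c)).headD "" ++ ")"]

lemma pv_outerElse (conds : List (String × Bool)) (group vars : List String)
    (hne : 1 ≤ group.countP (fun c => pvIsT conds c))
    (hhead : ∃ c0, group.head? = some c0 ∧ ∃ v ∈ vars, pvMatch v c0 = true)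
    (hsing : ∀ c ∈ group, pvSingle vars c) (m : Nat) :
    ∃ cn, (List.range m).foldl
      (fun (st : (List (List String) × List String) × Option String) (k : Nat) =>
        let new_var := "c" ++ PySem.Int.toStr (k : Int)
        let cond_neg : String :=
          ((group.find? (fun c => pvIsT conds c)).map (fun c => "(!" ++ c ++ ")")).getD ""
        let p := group.foldl (pvStepElse vars new_var) (PySem.Set.add [] cond_neg, st.2)
        ((st.1.1 ++ [p.1], st.1.2 ++ [new_var]), p.2))
      (([], []), none) =
    (((List.range m).map (pvEg conds group vars),
      (List.range m).map (fun (k : Nat) => "c" ++ PySem.Int.toStr (k : Int))), cn) := by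
  induction m with
  | zero => exact ⟨none, by simp⟩
  | succ m ih =>
    obtain ⟨cn, ih⟩ := ih
    refine ⟨(group.foldl (pvStepElse vars ("c" ++ PySem.Int.toStr (m : Int)))
      (PySem.Set.add [] (((group.find? (fun c => pvIsT conds c)).map
        (fun c => "(!" ++ c ++ ")")).getD ""), cn)).2, ?_⟩
    rw [List.range_succ, List.foldl_append, ih, List.map_append, List.map_append]
    simp only [List.foldl_cons, List.foldl_nil, List.map_cons, List.map_nil]
    have hr := pv_elseRound conds group vars ("c" ++ PySem.Int.toStr (m : Int)) cn hne hhead hsing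
    rw [hr]
    rfl

-- ===== VERDICT (by name: the statement is the Claim_ definition above) =====
theorem get_negated_spec : Claim_equal_get_negated := by
  intro conds group vars numb _ hpre
  unfold Spec_get_negated
  simp only [get_negated, get_negated_alt]
  have hn : group.foldl (fun n cond => if pvIsT conds cond = true then n + 1 else n) (0 : Int) =
      ((group.filter (fun c => pvIsT conds c)).length : Int) := by
    rw [PySem.List.foldl_count_if, zero_add, List.countP_eq_length_filter]
  rw [hn]
  split_ifs with hb
  · -- the n >= numb branch
    rw [PySem.List.pyRange_one]
    simp only [Int.sub_zero, zero_add]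
    rw [List.foldl_map, List.map_map, pv_outerIf conds group numb.toNat]
    refine congrArg (fun l => (l, ([] : List String))) ?_
    apply List.map_congr_left
    intro k _
    simp only [Function.comp_apply, Int.toNat_natCast]
    unfold pvBg
    cases hkk : (PySem.List.dedup (group.filter (fun c => pvIsT conds c)))[k]? with
    | none => simp
    | some t =>
      simp only
      have h1 : PySem.List.slice group none
          (some (((PySem.List.index? group t).getD 0 : Nat) : Int)) =
          List.take ((PySem.List.index? group t).getD 0) group := by
        rw [PySem.List.slice_to _ (Int.natCast_nonneg _), Int.toNat_natCast]
      have h2 : PySem.List.slice group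
          (some ((((PySem.List.index? group t).getD 0 : Nat) : Int) + 1)) none =
          List.drop ((PySem.List.index? group t).getD 0 + 1) group := by
        have hc : ((((PySem.List.index? group t).getD 0 : Nat) : Int) + 1) =
            (((PySem.List.index? group t).getD 0 + 1 : Nat) : Int) := by push_cast; ring
        rw [hc, PySem.List.slice_from _ (Int.natCast_nonneg _), Int.toNat_natCast]
      rw [h1, h2]
  · -- the renaming branch
    have hlt : ((group.countP (fun c => pvIsT conds c) : Int)) < numb := by
      rw [List.countP_eq_length_filter]; omega
    obtain ⟨hne, hhead, hsing⟩ := hpre.2 hlt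
    rw [PySem.List.pyRange_one]
    simp only [Int.sub_zero, zero_add]
    rw [List.foldl_map, List.map_map]
    obtain ⟨cn, hout⟩ := pv_outerElse conds group vars hne hhead hsing numb.toNat
    rw [hout]
    refine congrArg₂ Prod.mk ?_ ?_
    · rw [List.map_map]
      exact List.map_congr_left fun k _ => rfl
    · rw [List.map_map, List.map_map]
      exact List.map_congr_left fun k _ => rfl
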